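-- pv_equiv track=rewrite | github.com/david-mallinson/comp110-23s-workspace | exercises/ex07/dictionary.py | favorite_color
-- ===== SOURCE A (Python) =====
-- def favorite_color(color: dict[str, str]) -> str:
--     """Retunrs the most frequent color imputted by the user."""
--     output: dict[str, int] = {}
--     for i in color:
--         if color[i] in output:
--             output[color[i]] += 1
--         else:
--             output[color[i]] = 1
--     r_color: str = ""
--     counter: int = 0
--     for i in output:
--         if counter < output[i]:
--             counter = output[i]
--             r_color = i
--     return r_color
-- ===== SOURCE B (Python) =====
-- def favorite_color(color: dict[str, str]) -> str:
--     """Returns the most frequent color inputted by the user."""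
--     vals = list(color.values())
--     if not vals:
--         return ""
--     return max(vals, key=vals.count)
-- ===== Notes on version B (the rewrite author's own statement) =====
-- stated objective: idiomatic
-- what changed: Replaces A's hand-built frequency dict plus argmax loop with a single idiomatic max(values, key=values.count) over the value list (repeated-scan counting), with an explicit empty-dict guard; max's first-maximal rule reproduces A's insertion-order tie-break.
import Mathlib
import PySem

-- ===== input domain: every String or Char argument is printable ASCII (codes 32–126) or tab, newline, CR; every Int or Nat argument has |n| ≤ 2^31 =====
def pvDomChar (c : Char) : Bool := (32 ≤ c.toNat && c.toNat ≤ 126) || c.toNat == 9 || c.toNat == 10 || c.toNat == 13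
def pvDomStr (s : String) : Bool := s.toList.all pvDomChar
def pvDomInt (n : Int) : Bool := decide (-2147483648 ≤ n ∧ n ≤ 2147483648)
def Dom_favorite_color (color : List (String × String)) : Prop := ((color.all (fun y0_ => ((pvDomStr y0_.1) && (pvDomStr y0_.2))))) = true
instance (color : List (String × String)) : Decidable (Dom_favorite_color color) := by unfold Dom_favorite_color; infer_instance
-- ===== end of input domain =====

-- B replaces A's frequency-dict build + argmax loop with the idiomatic max(values, key=values.count) plus an empty guard (not faster; O(n^2) repeated scans).

-- ===== PORT A =====
def favorite_color (color : List (String × String)) : String :=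
  -- the dict parameter (insertion order, last value per key wins), as a PySem.Dict
  let d := PySem.Dict.ofList color
  -- output = {}; for i in color: if color[i] in output: output[color[i]] += 1 else: output[color[i]] = 1
  -- (iterating the dict's keys; color[i] is the item's value since dict keys are unique)
  let output : PySem.Dict String Int :=
    d.items.foldl (fun output i =>
      if output.contains i.2 then output.insert i.2 (output.getD i.2 0 + 1)
      else output.insert i.2 1) PySem.Dict.empty
  -- r_color = ""; counter = 0; for i in output: if counter < output[i]: counter = output[i]; r_color = i
  let st : Int × String :=
    output.items.foldl (fun st i => if st.1 < i.2 then (i.2, i.1) else st) (0, "")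
  st.2

-- ===== PORT B =====
def favorite_color_alt (color : List (String × String)) : String :=
  -- vals = list(color.values()); if not vals: return ""; return max(vals, key=vals.count)
  let vals := (PySem.Dict.ofList color).values
  if vals = [] then ""
  else (PySem.List.max? vals (fun v => (PySem.List.count vals v : Int))).getD ""

-- ===== PRECONDITION & SPEC =====
def Spec_favorite_color (color : List (String × String)) (out : String) : Prop := out = favorite_color_alt color
instance (color : List (String × String)) (out : String) : Decidable (Spec_favorite_color color out) := by unfold Spec_favorite_color; infer_instance

-- ===== CLAIM (what is proved, stated in full; the proofs are below) =====
def Claim_equal_favorite_color : Prop := ∀ (color : List (String × String)), Dom_favorite_color color → Spec_favorite_color color (favorite_color color)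

-- ===== LEMMAS AND PROOFS =====

-- A's first loop is collections.Counter of the value list.
theorem fold1_eq_counter (l : List String) :
    l.foldl (fun (output : PySem.Dict String Int) c =>
      if output.contains c then output.insert c (output.getD c 0 + 1)
      else output.insert c 1) PySem.Dict.empty
    = PySem.Dict.counter l := by
  rw [← PySem.Dict.foldl_insert_getD_add_one_eq_counter]
  have h : (fun (output : PySem.Dict String Int) c =>
      if output.contains c then output.insert c (output.getD c 0 + 1)
      else output.insert c 1)
      = fun (d : PySem.Dict String Int) x => d.insert x (d.getD x 0 + 1) := by
    funext d c
    by_cases h : d.contains c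
    · simp [h]
    · have h0 : d.getD c 0 = (0 : Int) :=
        PySem.Dict.getD_of_not_contains d 0 (by simpa using h)
      simp [h, h0]
  rw [h]

-- the elements Set.add appends beyond a given seen-prefix, in order
def newElems (seen : List String) : List String → List String
  | [] => []
  | x :: xs => if seen.contains x then newElems seen xs else x :: newElems (seen ++ [x]) xs

theorem foldl_add_eq_append (xs : List String) : ∀ seen : List String,
    xs.foldl PySem.Set.add seen = seen ++ newElems seen xs := by
  induction xs with
  | nil => intro seen; simp [newElems]
  | cons x xs ih =>
    intro seen
    by_cases h : x ∈ seen
    · simp [newElems, h, PySem.Set.add, PySem.Set.contains, ih seen]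
    · simp [newElems, h, PySem.Set.add, PySem.Set.contains, ih (seen ++ [x]), List.append_assoc]

theorem ofList_eq_newElems (xs : List String) :
    PySem.Set.ofList xs = newElems [] xs := by
  have := foldl_add_eq_append xs []
  simpa [PySem.Set.ofList, PySem.Set.empty] using this

-- one running-best step of Python's max(..., key=...)
theorem max?_step (key : String → Int) (a b : String) (l : List String) :
    PySem.List.max? (a :: b :: l) key
    = PySem.List.max? ((if key a < key b then b else a) :: l) key := by
  by_cases h : key a < key b
  · simp [PySem.List.max?, h]
  · simp [PySem.List.max?, h]

-- duplicates never move max?'s running best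
theorem skip_dups (key : String → Int) (xs : List String) : ∀ (seen : List String) (m : String),
    (∀ v ∈ seen, key v ≤ key m) →
    PySem.List.max? (m :: newElems seen xs) key = PySem.List.max? (m :: xs) key := by
  induction xs with
  | nil => intro seen m _; rfl
  | cons x xs ih =>
    intro seen m hinv
    by_cases h : seen.contains x
    · have hx : key x ≤ key m := hinv x (by simpa using h)
      have habs : PySem.List.max? (m :: x :: xs) key = PySem.List.max? (m :: xs) key := by
        rw [max?_step, if_neg (not_lt.mpr hx)]
      simp only [newElems, h, if_true]
      rw [ih seen m hinv, habs]
    · simp only [Bool.not_eq_true] at h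
      simp only [newElems, h, Bool.false_eq_true, if_false]
      have hinv' : ∀ v ∈ seen ++ [x], key v ≤ key (if key m < key x then x else m) := by
        intro v hv
        rcases List.mem_append.mp hv with hv | hv
        · by_cases hk : key m < key x
          · rw [if_pos hk]; exact le_of_lt (lt_of_le_of_lt (hinv v hv) hk)
          · rw [if_neg hk]; exact hinv v hv
        · simp only [List.mem_singleton] at hv
          rw [hv]
          by_cases hk : key m < key x
          · rw [if_pos hk]
          · rw [if_neg hk]; exact not_lt.mp hk
      rw [max?_step, ih (seen ++ [x]) _ hinv', max?_step]

-- max? over the deduplicated list equals max? over the list itself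
theorem max?_ofList (key : String → Int) (xs : List String) :
    PySem.List.max? (PySem.Set.ofList xs) key = PySem.List.max? xs key := by
  cases xs with
  | nil => rfl
  | cons y t =>
    rw [ofList_eq_newElems]
    simp only [newElems, List.contains_nil, Bool.false_eq_true, if_false, List.nil_append]
    exact skip_dups key t [y] y (by intro v hv; simp at hv; subst hv; exact le_refl _)

-- A's argmax pair-fold simulates max?'s running best seeded at m
theorem pairfold_sim (key : String → Int) (ys : List String) : ∀ m : String,
    ∃ r, PySem.List.max? (m :: ys) key = some r
    ∧ ys.foldl (fun (st : Int × String) k => if st.1 < key k then (key k, k) else st)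
        (key m, m) = (key r, r) := by
  induction ys with
  | nil => intro m; exact ⟨m, rfl, rfl⟩
  | cons y ys ih =>
    intro m
    by_cases h : key m < key y
    · obtain ⟨r, h1, h2⟩ := ih y
      refine ⟨r, ?_, by simpa [h] using h2⟩
      rw [max?_step, if_pos h]; exact h1
    · obtain ⟨r, h1, h2⟩ := ih m
      refine ⟨r, ?_, by simpa [h] using h2⟩
      rw [max?_step, if_neg h]; exact h1

-- A's argmax loop from (0, "") computes max?'s first maximum when all keys are ≥ 1
theorem pairfold_eq_max? (key : String → Int) (ys : List String)
    (hpos : ∀ v ∈ ys, 1 ≤ key v) :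
    (ys.foldl (fun (st : Int × String) k => if st.1 < key k then (key k, k) else st)
      ((0 : Int), "")).2
    = (PySem.List.max? ys key).getD "" := by
  cases ys with
  | nil => rfl
  | cons y t =>
    have hy : (0 : Int) < key y := lt_of_lt_of_le Int.zero_lt_one (hpos y (by simp))
    obtain ⟨r, h1, h2⟩ := pairfold_sim key t y
    rw [List.foldl_cons, if_pos hy, h2, h1, Option.getD_some]

-- ===== VERDICT (by name: the statement is the Claim_ definition above) =====
theorem favorite_color_spec : Claim_equal_favorite_color := by
  intro color _
  unfold Spec_favorite_color favorite_color favorite_color_alt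
  obtain ⟨L, hL⟩ : ∃ L, (PySem.Dict.ofList color).items = L := ⟨_, rfl⟩
  have hvals : (PySem.Dict.ofList color).values = L.map (fun i => i.2) := by
    rw [show (PySem.Dict.ofList color).values
        = (PySem.Dict.ofList color).items.map (fun i => i.2) from rfl, hL]
  show (List.foldl (fun (st : Int × String) i => if st.1 < i.2 then (i.2, i.1) else st) ((0 : Int), "")
      (List.foldl (fun (output : PySem.Dict String Int) i =>
          if output.contains i.2 then output.insert i.2 (output.getD i.2 0 + 1)
          else output.insert i.2 1) PySem.Dict.empty (PySem.Dict.ofList color).items).items).2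
    = if (PySem.Dict.ofList color).values = [] then ""
      else (PySem.List.max? (PySem.Dict.ofList color).values
            (fun v => (PySem.List.count (PySem.Dict.ofList color).values v : Int))).getD ""
  rw [hL, hvals]
  rw [(List.foldl_map (f := fun (i : String × String) => i.2)
        (g := fun (output : PySem.Dict String Int) c =>
          if output.contains c then output.insert c (output.getD c 0 + 1)
          else output.insert c 1) (l := L) (init := PySem.Dict.empty)).symm]
  rw [fold1_eq_counter, PySem.Dict.items_counter, List.foldl_map]
  have hpos : ∀ v ∈ PySem.Set.ofList (L.map (fun i => i.2)),
      1 ≤ ((List.count v (L.map (fun i => i.2)) : Nat) : Int) := by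
    intro v hv'
    have hm : v ∈ L.map (fun i => i.2) := (PySem.Set.mem_ofList _ v).mp hv'
    have hc : 0 < List.count v (L.map (fun i => i.2)) := List.count_pos_iff.mpr hm
    exact_mod_cast hc
  have h2 := pairfold_eq_max? (fun v => ((List.count v (L.map (fun i => i.2)) : Nat) : Int))
      (PySem.Set.ofList (L.map (fun i => i.2))) hpos
  simp only at h2 ⊢
  rw [h2, max?_ofList]
  by_cases hnil : L.map (fun i => i.2) = []
  · rw [hnil]; rfl
  · rw [if_neg hnil]
    simp [PySem.List.count_eq]
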